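-- pv_equiv track=rewrite | github.com/konglr/Lottery | models/method_a.py | count_neighbor
-- ===== SOURCE A (Python) =====
-- def count_neighbor(current_nums, prev_draw_nums):
--     """Count numbers that are neighbors (+/- 1) of previous draw."""
--     count = 0
--     for num in current_nums:
--         for prev_num in prev_draw_nums:
--             if abs(num - prev_num) == 1:
--                 count += 1
--                 break
--     return count
-- ===== SOURCE B (Python) =====
-- def count_neighbor(current_nums, prev_draw_nums):
--     """Count numbers that are neighbors (+/- 1) of previous draw."""
--     targets = set()
--     for p in prev_draw_nums:
--         targets.add(p - 1)
--         targets.add(p + 1)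
--     return sum(1 for num in current_nums if num in targets)
-- ===== Notes on version B (the rewrite author's own statement) =====
-- stated objective: faster
-- what changed: Replaces the nested per-number scan of prev_draw_nums with a precomputed set of neighbor targets (p-1, p+1) built once, then a single membership pass over current_nums.
import Mathlib
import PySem

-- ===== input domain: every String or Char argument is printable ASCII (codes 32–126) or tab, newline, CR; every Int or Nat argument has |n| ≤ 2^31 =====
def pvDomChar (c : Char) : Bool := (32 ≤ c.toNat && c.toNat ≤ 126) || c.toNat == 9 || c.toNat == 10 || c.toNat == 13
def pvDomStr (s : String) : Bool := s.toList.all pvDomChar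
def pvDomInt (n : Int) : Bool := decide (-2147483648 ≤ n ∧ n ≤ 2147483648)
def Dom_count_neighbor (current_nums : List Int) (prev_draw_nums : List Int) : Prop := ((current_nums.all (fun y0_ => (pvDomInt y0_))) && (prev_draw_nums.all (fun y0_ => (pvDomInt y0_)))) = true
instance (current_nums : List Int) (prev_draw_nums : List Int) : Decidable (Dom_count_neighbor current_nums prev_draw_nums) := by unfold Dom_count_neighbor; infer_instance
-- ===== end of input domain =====

-- B replaces A's nested per-number scan with a precomputed set of neighbor targets
-- (p-1, p+1 for each previous number) and a single membership pass (objective: faster).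


-- ===== PORT A =====
-- inner 'for prev_num in prev_draw_nums: if abs(num-prev_num)==1: count+=1; break'
-- (the break means each num contributes at most once: the scan stops at the first match)
def scanPrevA (num : Int) : List Int → Bool
  | [] => false
  | p :: rest => if (num - p).natAbs = 1 then true else scanPrevA num rest

def count_neighbor (current_nums : List Int) (prev_draw_nums : List Int) : Int :=
  current_nums.foldl
    (fun count num => if scanPrevA num prev_draw_nums then count + 1 else count) 0

-- ===== PORT B =====
-- targets = set(); for p in prev: targets.add(p-1); targets.add(p+1)
def neighborTargets (prev_draw_nums : List Int) : PySem.Set Int :=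
  prev_draw_nums.foldl
    (fun s p => PySem.Set.add (PySem.Set.add s (p - 1)) (p + 1)) PySem.Set.empty

-- sum(1 for num in current_nums if num in targets)
def count_neighbor_alt (current_nums : List Int) (prev_draw_nums : List Int) : Int :=
  let targets := neighborTargets prev_draw_nums
  current_nums.foldl
    (fun acc num => acc + (if PySem.Set.contains targets num then 1 else 0)) 0

-- ===== PRECONDITION & SPEC =====
def Spec_count_neighbor (current_nums : List Int) (prev_draw_nums : List Int) (out : Int) : Prop := out = count_neighbor_alt current_nums prev_draw_nums
instance (current_nums : List Int) (prev_draw_nums : List Int) (out : Int) : Decidable (Spec_count_neighbor current_nums prev_draw_nums out) := by unfold Spec_count_neighbor; infer_instance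

-- ===== CLAIM (what is proved, stated in full; the proofs are below) =====
def Claim_equal_count_neighbor : Prop := ∀ (current_nums : List Int) (prev_draw_nums : List Int), Dom_count_neighbor current_nums prev_draw_nums → Spec_count_neighbor current_nums prev_draw_nums (count_neighbor current_nums prev_draw_nums)

-- ===== LEMMAS AND PROOFS =====

theorem mem_foldl_targets (prev : List Int) (s : PySem.Set Int) (n : Int) :
    n ∈ prev.foldl (fun s p => PySem.Set.add (PySem.Set.add s (p - 1)) (p + 1)) s ↔
      n ∈ s ∨ ∃ p ∈ prev, n = p - 1 ∨ n = p + 1 := by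
  induction prev generalizing s with
  | nil => simp
  | cons q rest ih =>
    simp only [List.foldl_cons, ih, PySem.Set.mem_add, List.mem_cons]
    constructor
    · rintro (((h | h) | h) | ⟨p, hp, h⟩)
      · exact Or.inl h
      · exact Or.inr ⟨q, Or.inl rfl, Or.inl h⟩
      · exact Or.inr ⟨q, Or.inl rfl, Or.inr h⟩
      · exact Or.inr ⟨p, Or.inr hp, h⟩
    · rintro (h | ⟨p, (rfl | hp), (h | h)⟩)
      · exact Or.inl (Or.inl (Or.inl h))
      · exact Or.inl (Or.inl (Or.inr h))
      · exact Or.inl (Or.inr h)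
      · exact Or.inr ⟨p, hp, Or.inl h⟩
      · exact Or.inr ⟨p, hp, Or.inr h⟩

theorem scanPrevA_iff (num : Int) (prev : List Int) :
    scanPrevA num prev = true ↔ ∃ p ∈ prev, (num - p).natAbs = 1 := by
  induction prev with
  | nil => simp [scanPrevA]
  | cons q rest ih =>
    simp only [scanPrevA, List.mem_cons]
    split_ifs with h
    · simp only [true_iff]
      exact ⟨q, Or.inl rfl, h⟩
    · rw [ih]
      constructor
      · rintro ⟨p, hp, hn⟩; exact ⟨p, Or.inr hp, hn⟩
      · rintro ⟨p, (rfl | hp), hn⟩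
        · exact absurd hn h
        · exact ⟨p, hp, hn⟩

theorem scanPrevA_eq_contains (num : Int) (prev : List Int) :
    scanPrevA num prev = PySem.Set.contains (neighborTargets prev) num := by
  rw [Bool.eq_iff_iff, scanPrevA_iff, PySem.Set.contains_iff, neighborTargets,
    mem_foldl_targets]
  constructor
  · rintro ⟨p, hp, hn⟩
    refine Or.inr ⟨p, hp, ?_⟩; omega
  · rintro (h | ⟨p, hp, h⟩)
    · simp [PySem.Set.empty] at h
    · exact ⟨p, hp, by omega⟩

-- ===== VERDICT (by name: the statement is the Claim_ definition above) =====
theorem count_neighbor_spec : Claim_equal_count_neighbor := by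
  intro current prev _
  unfold Spec_count_neighbor count_neighbor count_neighbor_alt
  apply PySem.List.foldl_congr_mem
  intro acc num _
  rw [scanPrevA_eq_contains]
  split_ifs <;> omega
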